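-- pv_equiv track=rewrite | github.com/m1sterzer0/DaveProgrammingCompetitions | lib/lib.py | hamarad_or
-- ===== SOURCE A (Python) =====
-- def hamarad_or(n,a,inv=False) :
--     A = a.copy()
--     s,h = 2,1
--     while (s <= n) :
--         if not inv :
--             for l in range(0,n,s) :
--                 for i in range(h) : A[l+h+i] += A[l+i]
--         else :
--             for l in range(0,n,s) :
--                 for i in range(h) : A[l+h+i] -= A[l+i]
--         s <<= 1; h <<= 1
--     return A
-- ===== SOURCE B (Python) =====
-- def hamarad_or(n, a, inv=False):
--     # Recursive divide-and-conquer superset-sum (SOS/OR zeta) transform on the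
--     # length-n prefix; requires n to be a power of two (the transform's natural domain).
--     if n < 2:
--         return list(a)
--     if n & (n - 1):
--         raise ValueError("n must be a power of two")
--     def rec(seg):
--         m = len(seg)
--         if m <= 1:
--             return seg
--         lo = rec(seg[:m // 2])
--         hi = rec(seg[m // 2:])
--         if inv:
--             return lo + [y - x for x, y in zip(lo, hi)]
--         return lo + [y + x for x, y in zip(lo, hi)]
--     return rec(a[:n]) + a[n:]
-- ===== Notes on version B (the rewrite author's own statement) =====
-- stated objective: alternative
-- what changed: Replaces the three nested in-place level loops (h doubling over blocks) by a functional divide-and-conquer: recursively transform the two halves of the length-n prefix, then zip-add (or zip-subtract) the low half into the high half.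
-- outside the precondition, e.g. on hamarad_or(3, [1, 2, 3, 4], False): A returns [1, 3, 3, 7], B raises ValueError
import Mathlib
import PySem

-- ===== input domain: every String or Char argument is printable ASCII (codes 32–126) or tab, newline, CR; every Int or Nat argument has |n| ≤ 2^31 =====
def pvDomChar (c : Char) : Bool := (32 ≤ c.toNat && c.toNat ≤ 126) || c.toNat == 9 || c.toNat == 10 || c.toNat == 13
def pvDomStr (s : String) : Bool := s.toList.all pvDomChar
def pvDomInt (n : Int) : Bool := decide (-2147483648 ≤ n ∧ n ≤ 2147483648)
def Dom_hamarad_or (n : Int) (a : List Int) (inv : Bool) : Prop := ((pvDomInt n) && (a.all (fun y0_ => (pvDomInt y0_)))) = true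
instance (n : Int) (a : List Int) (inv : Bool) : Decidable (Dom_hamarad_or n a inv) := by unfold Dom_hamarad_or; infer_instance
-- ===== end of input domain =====

-- B replaces A's three nested in-place level loops by a functional divide-and-conquer
-- over halves (objective: alternative, same asymptotic cost).

-- ===== PORT A =====
-- A[dst] += sgn * A[src]  (sgn = ±1 covers the += / -= branches); an out-of-range
-- index (IndexError in Python) leaves the list unchanged — such inputs are excluded by Pre_.
def pvAddAt (A : List Int) (dst src sgn : Int) : List Int :=
  match PySem.List.pyGet? A dst, PySem.List.pyGet? A src with
  | some y, some x => A.set dst.toNat (y + sgn * x)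
  | _, _ => A

-- for i in range(h): A[l+h+i] ±= A[l+i]
def pvInner (sgn h : Int) (A : List Int) (l : Int) : List Int :=
  (PySem.List.pyRange 0 h 1).foldl (fun A i => pvAddAt A (l + h + i) (l + i) sgn) A

-- for l in range(0, n, s): inner loop
def pvLevelA (n s h sgn : Int) (A : List Int) : List Int :=
  (PySem.List.pyRange 0 n s).foldl (pvInner sgn h) A

-- while s <= n: level; s <<= 1; h <<= 1.  The '0 < s' conjunct is a totality guard
-- only (s starts at 2 and doubles, so it is always true on the initial call).
def pvLoopA (n s h : Int) (inv : Bool) (A : List Int) : List Int :=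
  if hc : 0 < s ∧ s ≤ n then
    pvLoopA n (2*s) (2*h) inv (if inv = false then pvLevelA n s h 1 A else pvLevelA n s h (-1) A)
  else A
termination_by (n + 1 - s).toNat
decreasing_by omega

def hamarad_or (n : Int) (a : List Int) (inv : Bool) : List Int :=
  pvLoopA n 2 1 inv a

-- ===== PORT B =====
-- rec(seg): transform each half, then zip the low half into the high half.
def pvRecB (inv : Bool) (seg : List Int) : List Int :=
  if seg.length ≤ 1 then seg
  else
    let lo := pvRecB inv (seg.take (seg.length / 2))
    let hi := pvRecB inv (seg.drop (seg.length / 2))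
    if inv then lo ++ List.zipWith (fun x y => y - x) lo hi
    else lo ++ List.zipWith (fun x y => y + x) lo hi
termination_by seg.length
decreasing_by
  · simp only [List.length_take]; omega
  · simp only [List.length_drop]; omega

-- Source B raises ValueError when n ≥ 2 is not a power of two; those inputs are outside
-- Pre_, where this port's value is unspecified.
def hamarad_or_alt (n : Int) (a : List Int) (inv : Bool) : List Int :=
  if n < 2 then a
  else pvRecB inv (a.take n.toNat) ++ a.drop n.toNat

-- ===== PRECONDITION & SPEC =====
-- Pre_ excludes n ≥ 2 that is not a power of two (there A applies an accidental partial
-- transform across block boundaries, or raises IndexError, while B raises ValueError),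
-- and n ≥ 2 with len(a) < n (A raises IndexError).
def Pre_hamarad_or (n : Int) (a : List Int) (inv : Bool) : Prop :=
  n < 2 ∨ (n ≤ (a.length : Int) ∧ n.toNat = 2 ^ Nat.log2 n.toNat)
instance (n : Int) (a : List Int) (inv : Bool) : Decidable (Pre_hamarad_or n a inv) := by
  unfold Pre_hamarad_or; infer_instance

def pvWitness_hamarad_or : Int × List Int × Bool := (4, ([1, 2, 3, 5], false))

def Spec_hamarad_or (n : Int) (a : List Int) (inv : Bool) (out : List Int) : Prop := out = hamarad_or_alt n a inv
instance (n : Int) (a : List Int) (inv : Bool) (out : List Int) : Decidable (Spec_hamarad_or n a inv out) := by unfold Spec_hamarad_or; infer_instance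

-- ===== CLAIM (what is proved, stated in full; the proofs are below) =====
def Claim_equal_hamarad_or : Prop := ∀ (n : Int) (a : List Int) (inv : Bool), Dom_hamarad_or n a inv → Pre_hamarad_or n a inv → Spec_hamarad_or n a inv (hamarad_or n a inv)

-- ===== LEMMAS AND PROOFS =====

-- Model of one level: split each 2h-block B into halves L, R and replace it by
-- L ++ zipWith (fun x y => y + sgn*x) L R.
def pvBlockOp (sgn : Int) (h : Nat) (B : List Int) : List Int :=
  B.take h ++ List.zipWith (fun x y => y + sgn * x) (B.take h) (B.drop h)

def pvLevelM (sgn : Int) (h : Nat) (A : List Int) : List Int :=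
  if hc : 0 < h ∧ 2*h ≤ A.length then
    pvBlockOp sgn h (A.take (2*h)) ++ pvLevelM sgn h (A.drop (2*h))
  else A
termination_by A.length
decreasing_by simp only [List.length_drop]; omega

theorem pvBlockOp_length (sgn : Int) (h : Nat) (B : List Int) (hB : B.length = 2*h) :
    (pvBlockOp sgn h B).length = 2*h := by
  simp [pvBlockOp, hB]; omega

theorem pvLevelM_length (sgn : Int) (h : Nat) : ∀ (A : List Int),
    (pvLevelM sgn h A).length = A.length := by
  intro A
  induction hn : A.length using Nat.strong_induction_on generalizing A with
  | _ n IH =>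
    rw [pvLevelM]
    split_ifs with hc
    · have hb : (A.take (2*h)).length = 2*h := by simp; omega
      have hrec := IH (A.drop (2*h)).length (by simp; omega) (A.drop (2*h)) rfl
      rw [List.length_append, pvBlockOp_length sgn h _ hb, hrec]
      simp
      omega
    · exact hn

theorem pvLevelM_nil (sgn : Int) (h : Nat) : pvLevelM sgn h [] = [] := by
  rw [pvLevelM, dif_neg (by rintro ⟨h1, h2⟩; simp at h2; omega)]

theorem pvLevelM_block (sgn : Int) (h : Nat) (hh : 0 < h) (B : List Int) (hB : B.length = 2*h) :
    pvLevelM sgn h B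
      = B.take h ++ List.zipWith (fun x y => y + sgn * x) (B.take h) (B.drop h) := by
  rw [pvLevelM, dif_pos ⟨hh, by omega⟩]
  rw [List.take_of_length_le (by omega), List.drop_of_length_le (by omega), pvLevelM_nil]
  simp [pvBlockOp]

theorem pvLevelM_append (sgn : Int) (h : Nat) (hh : 0 < h) :
    ∀ (m : Nat) (lo hi : List Int), lo.length = 2*h*m →
    pvLevelM sgn h (lo ++ hi) = pvLevelM sgn h lo ++ pvLevelM sgn h hi := by
  intro m
  induction m with
  | zero =>
    intro lo hi hlo
    have hlo0 : lo.length = 0 := by simpa using hlo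
    have : lo = [] := List.eq_nil_of_length_eq_zero hlo0
    simp [this, pvLevelM_nil]
  | succ m ih =>
    intro lo hi hlo
    have hx : lo.length = 2*h*m + 2*h := by rw [hlo]; ring
    have h1 : 2*h ≤ lo.length := by omega
    rw [pvLevelM, dif_pos ⟨hh, by simp; omega⟩]
    rw [List.take_append_of_le_length h1, List.drop_append_of_le_length h1]
    rw [ih (lo.drop (2*h)) hi (by simp; omega)]
    conv_rhs => rw [pvLevelM, dif_pos ⟨hh, h1⟩]
    simp [List.append_assoc]

-- the single in-place update, in append normal form
theorem set_len_mid (pre : List Int) (y v : Int) (suf : List Int) :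
    (pre ++ y :: suf).set pre.length v = pre ++ v :: suf := by
  rw [List.set_append]
  simp

theorem pvAddAt_two (Q L M suf : List Int) (x y sgn : Int) :
    pvAddAt (Q ++ x :: (L ++ (M ++ y :: suf)))
      ((Q.length : Int) + (1 + ((L.length : Int) + M.length))) (Q.length : Int) sgn
    = Q ++ x :: (L ++ (M ++ (y + sgn * x) :: suf)) := by
  have hX : Q ++ x :: (L ++ (M ++ y :: suf)) = (Q ++ x :: (L ++ M)) ++ y :: suf := by
    simp
  have hdst : ((Q.length : Int) + (1 + ((L.length : Int) + M.length)))
      = ((Q ++ x :: (L ++ M)).length : Int) := by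
    push_cast [List.length_append, List.length_cons]
    ring
  have h1 : PySem.List.pyGet? (Q ++ x :: (L ++ (M ++ y :: suf)))
      ((Q.length : Int) + (1 + ((L.length : Int) + M.length))) = some y := by
    rw [hdst, hX]; exact PySem.List.pyGet?_append_length _ _ _
  have h2 : PySem.List.pyGet? (Q ++ x :: (L ++ (M ++ y :: suf))) (Q.length : Int) = some x :=
    PySem.List.pyGet?_append_length _ _ _
  unfold pvAddAt
  rw [h1, h2]
  show (Q ++ x :: (L ++ (M ++ y :: suf))).set
      ((Q.length : Int) + (1 + ((L.length : Int) + M.length))).toNat (y + sgn * x)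
    = Q ++ x :: (L ++ (M ++ (y + sgn * x) :: suf))
  rw [hdst, hX, Int.toNat_natCast, set_len_mid]
  simp

-- the inner loop (for i in range(h)) on a decomposed list
theorem inner_fold (sgn : Int) :
    ∀ (L R : List Int), L.length = R.length → ∀ (Q M S : List Int),
    (List.range R.length).foldl
      (fun A (i : Nat) => pvAddAt A ((Q.length : Int) + (((L.length : Int) + M.length) + i))
        ((Q.length : Int) + i) sgn)
      (Q ++ (L ++ (M ++ (R ++ S))))
    = Q ++ (L ++ (M ++ (List.zipWith (fun x y => y + sgn * x) L R ++ S))) := by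
  intro L
  induction L with
  | nil =>
    intro R hLR Q M S
    have hR0 : R.length = 0 := by simpa using hLR.symm
    have : R = [] := List.eq_nil_of_length_eq_zero hR0
    simp [this]
  | cons x L' ih =>
    intro R hLR Q M S
    cases R with
    | nil => simp at hLR
    | cons y R' =>
      have hlen : L'.length = R'.length := by simpa using hLR
      simp only [List.length_cons]
      rw [List.range_succ_eq_map]
      simp only [List.foldl_cons, List.foldl_map]
      have hstep :
          pvAddAt (Q ++ (x :: L' ++ (M ++ (y :: R' ++ S))))
            ((Q.length : Int) + (((L'.length + 1 : Nat) : Int) + (M.length : Int) + ((0:Nat) : Int)))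
            ((Q.length : Int) + ((0:Nat) : Int)) sgn
          = Q ++ ((x :: L') ++ (M ++ ((y + sgn * x) :: R' ++ S))) := by
        have h2 := pvAddAt_two Q L' M (R' ++ S) x y sgn
        have e1 : ((Q.length : Int) + (((L'.length + 1 : Nat) : Int) + (M.length : Int) + ((0:Nat) : Int)))
            = ((Q.length : Int) + (1 + ((L'.length : Int) + M.length))) := by
          push_cast
          ring
        have e2 : ((Q.length : Int) + ((0:Nat) : Int)) = (Q.length : Int) := by push_cast; ring
        rw [e1, e2]
        simp only [List.cons_append, List.append_assoc] at h2 ⊢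
        exact h2
      rw [hstep]
      have hfun : (fun (A : List Int) (i : Nat) =>
            pvAddAt A ((Q.length : Int) + (((L'.length + 1 : Nat) : Int) + (M.length : Int) + ((Nat.succ i : Nat) : Int)))
              ((Q.length : Int) + ((Nat.succ i : Nat) : Int)) sgn)
          = (fun (A : List Int) (i : Nat) =>
            pvAddAt A ((((Q ++ [x]).length : Int)) + ((((L'.length : Int)) + (((M ++ [y + sgn * x]).length : Int))) + i))
              (((Q ++ [x]).length : Int) + i) sgn) := by
        funext A i
        have e1 : ((Q.length : Int) + (((L'.length + 1 : Nat) : Int) + (M.length : Int) + ((Nat.succ i : Nat) : Int)))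
            = ((((Q ++ [x]).length : Int)) + ((((L'.length : Int)) + (((M ++ [y + sgn * x]).length : Int))) + i)) := by
          push_cast [List.length_append, List.length_cons, List.length_nil]
          ring
        have e2 : ((Q.length : Int) + ((Nat.succ i : Nat) : Int)) = (((Q ++ [x]).length : Int) + i) := by
          push_cast [List.length_append, List.length_cons, List.length_nil]
          ring
        rw [e1, e2]
      rw [hfun]
      have hinit : Q ++ ((x :: L') ++ (M ++ ((y + sgn * x) :: R' ++ S)))
          = (Q ++ [x]) ++ (L' ++ ((M ++ [y + sgn * x]) ++ (R' ++ S))) := by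
        simp
      rw [hinit, ih R' hlen (Q ++ [x]) (M ++ [y + sgn * x]) S]
      simp

-- the inner loop IS pvBlockOp on the block
theorem pvInner_eq (sgn : Int) (h : Nat) (Q B S : List Int) (hB : B.length = 2*h) :
    pvInner sgn (h : Int) (Q ++ (B ++ S)) ((Q.length : Int))
      = Q ++ (pvBlockOp sgn h B ++ S) := by
  unfold pvInner
  rw [PySem.List.pyRange_one]
  rw [List.foldl_map]
  have hc : ((h : Int) - 0).toNat = h := by omega
  rw [hc]
  have hL : (B.take h).length = h := by simp; omega
  have hR : (B.drop h).length = h := by simp; omega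
  have hthis := inner_fold sgn (B.take h) (B.drop h) (by omega) Q [] S
  rw [hR] at hthis
  simp only [List.nil_append] at hthis
  have hback : B.take h ++ (B.drop h ++ S) = B ++ S := by
    rw [← List.append_assoc, List.take_append_drop]
  rw [show Q ++ (B ++ S) = Q ++ (B.take h ++ (B.drop h ++ S)) from by rw [hback]]
  have hfun : (fun (A : List Int) (k : Nat) =>
        pvAddAt A ((Q.length : Int) + (h : Int) + ((0:Int) + (k : Int))) ((Q.length : Int) + ((0:Int) + (k:Int))) sgn)
      = (fun (A : List Int) (i : Nat) =>
        pvAddAt A ((Q.length : Int) + ((((B.take h).length : Int) + (([] : List Int).length : Int)) + i))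
          ((Q.length : Int) + i) sgn) := by
    funext A i
    have e1 : ((Q.length : Int) + (h : Int) + ((0:Int) + (i : Int)))
        = ((Q.length : Int) + ((((B.take h).length : Int) + (([] : List Int).length : Int)) + i)) := by
      push_cast [hL, List.length_nil]
      ring
    have e2 : ((Q.length : Int) + ((0:Int) + (i:Int))) = ((Q.length : Int) + i) := by ring
    rw [e1, e2]
  rw [hfun, hthis]
  simp [pvBlockOp]

-- for l in range(0, n, s) with s = 2h, on a prefix P that is a whole number of blocks
theorem levelFold_shift (sgn : Int) (h : Nat) (hh : 0 < h) :
    ∀ (m : Nat) (Q P S : List Int), P.length = 2*h*m →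
    (List.range m).foldl
      (fun A (k : Nat) => pvInner sgn (h : Int) A ((Q.length : Int) + (2*(h:Int)) * k))
      (Q ++ (P ++ S))
    = Q ++ (pvLevelM sgn h P ++ S) := by
  intro m
  induction m with
  | zero =>
    intro Q P S hP
    have hP0 : P.length = 0 := by simpa using hP
    have : P = [] := List.eq_nil_of_length_eq_zero hP0
    simp [this, pvLevelM_nil]
  | succ m ih =>
    intro Q P S hP
    have hx : P.length = 2*h*m + 2*h := by rw [hP]; ring
    have h1 : 2*h ≤ P.length := by omega
    have hB : (P.take (2*h)).length = 2*h := by simp; omega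
    rw [List.range_succ_eq_map, List.foldl_cons, List.foldl_map]
    have hsplitP : P.take (2*h) ++ (P.drop (2*h) ++ S) = P ++ S := by
      rw [← List.append_assoc, List.take_append_drop]
    have hstep :
        pvInner sgn (h : Int) (Q ++ (P ++ S)) ((Q.length : Int) + (2*(h:Int)) * (((0:Nat)) : Int))
          = Q ++ (pvBlockOp sgn h (P.take (2*h)) ++ (P.drop (2*h) ++ S)) := by
      have hmain := pvInner_eq sgn h Q (P.take (2*h)) (P.drop (2*h) ++ S) hB
      rw [show ((Q.length : Int) + (2*(h:Int)) * (((0:Nat)) : Int)) = (Q.length : Int) from by push_cast; ring]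
      rw [show Q ++ (P ++ S) = Q ++ (P.take (2*h) ++ (P.drop (2*h) ++ S)) from by rw [hsplitP]]
      exact hmain
    rw [hstep]
    have hQ' : ((Q ++ pvBlockOp sgn h (P.take (2*h))).length : Int)
        = (Q.length : Int) + 2*(h:Int) := by
      rw [List.length_append, pvBlockOp_length sgn h _ hB]
      push_cast
      ring
    have hfun : (fun (A : List Int) (k : Nat) =>
          pvInner sgn (h : Int) A ((Q.length : Int) + (2*(h:Int)) * (((Nat.succ k) : Nat) : Int)))
        = (fun (A : List Int) (k : Nat) =>
          pvInner sgn (h : Int) A (((Q ++ pvBlockOp sgn h (P.take (2*h))).length : Int) + (2*(h:Int)) * k)) := by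
      funext A k
      have e1 : ((Q.length : Int) + (2*(h:Int)) * (((Nat.succ k) : Nat) : Int))
          = (((Q ++ pvBlockOp sgn h (P.take (2*h))).length : Int) + (2*(h:Int)) * k) := by
        rw [hQ']
        push_cast
        ring
      rw [e1]
    rw [hfun]
    have hrec := ih (Q ++ pvBlockOp sgn h (P.take (2*h))) (P.drop (2*h)) S (by simp; omega)
    simp only [List.append_assoc] at hrec ⊢
    rw [hrec]
    conv_rhs => rw [pvLevelM, dif_pos ⟨hh, h1⟩]
    simp [List.append_assoc]

-- pvLevelA on P ++ S is pvLevelM on P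
theorem pvLevelA_eq (sgn : Int) (h : Nat) (hh : 0 < h) (m : Nat) (P S : List Int)
    (hP : P.length = 2*h*m) :
    pvLevelA ((2*h*m : Nat) : Int) (2*(h:Int)) (h:Int) sgn (P ++ S)
      = pvLevelM sgn h P ++ S := by
  unfold pvLevelA
  have hs : (0:Int) < 2*(h:Int) := by positivity
  rw [PySem.List.pyRange_of_pos 0 ((2*h*m : Nat) : Int) hs]
  have hcount : (if (0:Int) < ((2*h*m : Nat) : Int)
      then ((((2*h*m : Nat) : Int) - 0 + (2*(h:Int)) - 1) / (2*(h:Int))).toNat else 0) = m := by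
    by_cases hm : 0 < m
    · rw [if_pos (by push_cast; positivity)]
      rw [show (((2*h*m : Nat) : Int) - 0 + (2*(h:Int)) - 1)
          = (2*(h:Int) - 1) + (2*(h:Int)) * m from by push_cast; ring]
      rw [Int.add_mul_ediv_left _ _ (by omega)]
      rw [Int.ediv_eq_zero_of_lt (by omega) (by omega)]
      omega
    · have hm0 : m = 0 := by omega
      simp [hm0]
  rw [hcount, List.foldl_map]
  have hshift := levelFold_shift sgn h hh m [] P S hP
  simp only [List.nil_append] at hshift
  have hfun : (fun (A : List Int) (k : Nat) => pvInner sgn (h:Int) A ((0:Int) + 2*(h:Int) * (k:Int)))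
      = (fun (A : List Int) (k : Nat) =>
          pvInner sgn (h:Int) A ((([] : List Int).length : Int) + (2*(h:Int)) * k)) := by
    funext A k
    have e1 : ((0:Int) + 2*(h:Int) * (k:Int)) = ((([] : List Int).length : Int) + (2*(h:Int)) * k) := by
      simp
    rw [e1]
  rw [hfun]
  exact hshift

-- the iterated levels, h doubling, mirroring the while loop on the prefix
def pvIterM (sgn : Int) (h : Nat) (A : List Int) : List Int :=
  if hc : 0 < h ∧ 2*h ≤ A.length then pvIterM sgn (2*h) (pvLevelM sgn h A) else A
termination_by A.length + 1 - h
decreasing_by rw [pvLevelM_length]; omega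

theorem pvLoopA_eq (inv : Bool) :
    ∀ (c : Nat), ∀ (h : Nat) (n : Int) (P S : List Int),
    0 < h → (∃ j : Nat, h = 2^j) → (∃ k : Nat, P.length = 2^k) → n = (P.length : Int) →
    c = P.length + 1 - h →
    pvLoopA n (2*(h:Int)) (h:Int) inv (P ++ S)
      = pvIterM (if inv then -1 else 1) h P ++ S := by
  intro c
  induction c using Nat.strong_induction_on with
  | _ c IH =>
    intro h n P S hh hj' hk' hn hc
    obtain ⟨j, hj⟩ := hj'
    obtain ⟨k, hk⟩ := hk'
    by_cases hguard : 2*h ≤ P.length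
    · have hjk : j + 1 ≤ k := by
        by_contra hcon
        have h1 : k ≤ j := by omega
        have h2 : (2:Nat)^k ≤ 2^j := Nat.pow_le_pow_right (by omega) h1
        omega
      have hdvd : P.length = 2*h * 2^(k-(j+1)) := by
        rw [hk, hj]
        rw [show 2*2^j * 2^(k-(j+1)) = 2^(j+1) * 2^(k-(j+1)) from by ring, ← pow_add]
        congr 1
        omega
      rw [pvLoopA, dif_pos ⟨by positivity, by rw [hn]; push_cast; omega⟩]
      have hlevel : (if inv = false then pvLevelA n (2*(h:Int)) (h:Int) 1 (P ++ S)
            else pvLevelA n (2*(h:Int)) (h:Int) (-1) (P ++ S))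
          = pvLevelM (if inv then -1 else 1) h P ++ S := by
        have hn' : n = ((2*h*2^(k-(j+1)) : Nat) : Int) := by rw [hn, hdvd]
        cases inv
        · simp only [Bool.false_eq_true, if_true, if_false, reduceIte]
          rw [hn']
          exact pvLevelA_eq 1 h hh _ P S hdvd
        · simp only [if_true, if_false, reduceIte]
          rw [hn']
          exact pvLevelA_eq (-1) h hh _ P S hdvd
      rw [hlevel]
      have hP' : (pvLevelM (if inv then -1 else 1) h P).length = P.length := pvLevelM_length _ _ _
      have hrec := IH ((pvLevelM (if inv then -1 else 1) h P).length + 1 - 2*h)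
        (by rw [hP']; omega)
        (2*h) n (pvLevelM (if inv then -1 else 1) h P) S
        (by omega) ⟨j+1, by rw [hj]; ring⟩ ⟨k, by rw [hP', hk]⟩
        (by rw [hP']; exact hn) rfl
      rw [show ((2*h : Nat) : Int) = 2*(h:Int) from by push_cast; ring] at hrec
      rw [hrec]
      conv_rhs => rw [pvIterM, dif_pos ⟨hh, hguard⟩]
    · rw [pvLoopA, dif_neg (by rw [hn]; push_cast; omega)]
      rw [pvIterM, dif_neg (by omega)]

-- divide and conquer: the iterated levels on lo ++ hi are the iterated levels on each
-- half followed by the final combining level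
theorem pvIterM_split (sgn : Int) :
    ∀ (c : Nat) (j k : Nat), j ≤ k → c = k - j → ∀ (lo hi : List Int),
    lo.length = 2^k → hi.length = 2^k →
    pvIterM sgn (2^j) (lo ++ hi)
      = pvIterM sgn (2^j) lo
        ++ List.zipWith (fun x y => y + sgn * x) (pvIterM sgn (2^j) lo) (pvIterM sgn (2^j) hi) := by
  intro c
  induction c with
  | zero =>
    intro j k hjk hc lo hi hlo hhi
    have hkj : j = k := by omega
    subst hkj
    have hlen : (lo ++ hi).length = 2*2^j := by rw [List.length_append, hlo, hhi]; ring
    rw [pvIterM, dif_pos ⟨Nat.two_pow_pos j, by omega⟩]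
    rw [pvLevelM_block sgn (2^j) (Nat.two_pow_pos j) _ hlen]
    rw [show (2^j : Nat) = lo.length from hlo.symm]
    rw [List.take_left, List.drop_left]
    have hz : (List.zipWith (fun x y => y + sgn * x) lo hi).length = 2^j := by
      rw [List.length_zipWith, hlo, hhi]
      omega
    rw [pvIterM, dif_neg (by
      rintro ⟨h1, h2⟩
      rw [List.length_append, hlo, hz] at h2
      omega)]
    rw [pvIterM, dif_neg (by rintro ⟨h1, h2⟩; rw [hlo] at h2; omega)]
    rw [pvIterM, dif_neg (by rintro ⟨h1, h2⟩; rw [hhi] at h2; omega)]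
  | succ c ih =>
    intro j k hjk hc lo hi hlo hhi
    have hjk' : j + 1 ≤ k := by omega
    have hpow : (2:Nat)^(j+1) ≤ 2^k := Nat.pow_le_pow_right (by omega) hjk'
    have hpow' : (2:Nat)^(j+1) = 2*2^j := by ring
    have hpos : 0 < (2:Nat)^j := Nat.two_pow_pos j
    have hdvd : lo.length = 2*2^j * 2^(k-(j+1)) := by
      rw [hlo]
      rw [show 2*2^j * 2^(k-(j+1)) = 2^(j+1) * 2^(k-(j+1)) from by ring, ← pow_add]
      congr 1
      omega
    rw [pvIterM, dif_pos ⟨hpos, by rw [List.length_append, hlo, hhi]; omega⟩]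
    rw [pvLevelM_append sgn (2^j) hpos (2^(k-(j+1))) lo hi hdvd]
    have hlo' : (pvLevelM sgn (2^j) lo).length = 2^k := by rw [pvLevelM_length, hlo]
    have hhi' : (pvLevelM sgn (2^j) hi).length = 2^k := by rw [pvLevelM_length, hhi]
    have hs := ih (j+1) k hjk' (by omega) (pvLevelM sgn (2^j) lo) (pvLevelM sgn (2^j) hi) hlo' hhi'
    rw [hpow'] at hs
    rw [hs]
    rw [show pvIterM sgn (2*2^j) (pvLevelM sgn (2^j) lo) = pvIterM sgn (2^j) lo from by
      conv_rhs => rw [pvIterM, dif_pos ⟨hpos, by omega⟩]]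
    rw [show pvIterM sgn (2*2^j) (pvLevelM sgn (2^j) hi) = pvIterM sgn (2^j) hi from by
      conv_rhs => rw [pvIterM, dif_pos ⟨hpos, by omega⟩]]

theorem pvRecB_step (inv : Bool) (seg : List Int) (h2 : ¬ seg.length ≤ 1) :
    pvRecB inv seg
      = if inv then
          pvRecB inv (seg.take (seg.length / 2))
            ++ List.zipWith (fun x y => y - x) (pvRecB inv (seg.take (seg.length / 2)))
                (pvRecB inv (seg.drop (seg.length / 2)))
        else
          pvRecB inv (seg.take (seg.length / 2))
            ++ List.zipWith (fun x y => y + x) (pvRecB inv (seg.take (seg.length / 2)))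
                (pvRecB inv (seg.drop (seg.length / 2))) := by
  rw [pvRecB, if_neg h2]

theorem pvRecB_eq (inv : Bool) :
    ∀ (k : Nat) (A : List Int), A.length = 2^k →
    pvIterM (if inv then -1 else 1) 1 A = pvRecB inv A := by
  intro k
  induction k with
  | zero =>
    intro A hA
    rw [pvIterM, dif_neg (by rintro ⟨h1, h2⟩; omega)]
    rw [pvRecB, if_pos (by omega)]
  | succ k ih =>
    intro A hA
    have hp : 0 < (2:Nat)^k := Nat.two_pow_pos k
    have hA2 : A.length = 2*2^k := by rw [hA]; ring
    have hhalf : A.length / 2 = 2^k := by omega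
    have hlo : (A.take (2^k)).length = 2^k := by simp; omega
    have hhi : (A.drop (2^k)).length = 2^k := by simp; omega
    have hsplit : A = A.take (2^k) ++ A.drop (2^k) := (List.take_append_drop _ A).symm
    have hs := pvIterM_split (if inv then -1 else 1) k 0 k (Nat.zero_le k) (by omega)
      (A.take (2^k)) (A.drop (2^k)) hlo hhi
    rw [pow_zero] at hs
    conv_lhs => rw [hsplit]
    rw [hs, ih _ hlo, ih _ hhi]
    rw [pvRecB_step inv A (by omega), hhalf]
    cases inv
    · simp only [Bool.false_eq_true, reduceIte]
      rw [show (fun (x y : Int) => y + 1 * x) = (fun (x y : Int) => y + x) from by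
        funext x y; ring]
    · simp only [reduceIte]
      rw [show (fun (x y : Int) => y + (-1) * x) = (fun (x y : Int) => y - x) from by
        funext x y; ring]

-- ===== VERDICT (by name: the statement is the Claim_ definition above) =====
theorem hamarad_or_spec : Claim_equal_hamarad_or := by
  intro n a inv _hD hPre
  unfold Spec_hamarad_or hamarad_or hamarad_or_alt
  by_cases hn2 : n < 2
  · rw [pvLoopA, dif_neg (by omega), if_pos hn2]
  · rcases hPre with h | ⟨hle, hpow⟩
    · omega
    rw [if_neg hn2]
    have hN0 : (0:Int) ≤ n := by omega
    have hNa : n.toNat ≤ a.length := by omega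
    have hP : (a.take n.toNat).length = n.toNat := by simp; omega
    have hPk : (a.take n.toNat).length = 2 ^ Nat.log2 n.toNat := by rw [hP]; exact hpow
    have hmain := pvLoopA_eq inv ((a.take n.toNat).length + 1 - 1) 1 n
      (a.take n.toNat) (a.drop n.toNat)
      (by omega) ⟨0, by norm_num⟩ ⟨Nat.log2 n.toNat, hPk⟩ (by rw [hP]; omega) rfl
    rw [List.take_append_drop] at hmain
    norm_num at hmain
    rw [hmain, pvRecB_eq inv (Nat.log2 n.toNat) (a.take n.toNat) hPk]
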